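-- pv_equiv track=rewrite | github.com/thaulow/Student-Record-System | EncodeDecodeClass.py | encodedecode_integer
-- ===== SOURCE A (Python) =====
-- def encodedecode_integer(integer):
--
--     text = str(integer)
--
--     length = len(text)
--     string = ''
--
--     first = text[0]
--     last = text[len(text) - 1]
--
--     for num in text:
--         if len(string) == 0:
--             string += last
--         elif len(string) == length - 1:
--             string += first
--         else:
--             string += num
--
--     return string
-- ===== SOURCE B (Python) =====
-- def encodedecode_integer(integer):
--     lst = list(str(integer))
--     lst[0], lst[-1] = lst[-1], lst[0]
--     return ''.join(lst)
-- ===== Notes on version B (the rewrite author's own statement) =====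
-- stated objective: simpler
-- what changed: Replaces A's char-by-char accumulating loop with positional branches by a single endpoint swap on a list of the digits, then a join.
import Mathlib
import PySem

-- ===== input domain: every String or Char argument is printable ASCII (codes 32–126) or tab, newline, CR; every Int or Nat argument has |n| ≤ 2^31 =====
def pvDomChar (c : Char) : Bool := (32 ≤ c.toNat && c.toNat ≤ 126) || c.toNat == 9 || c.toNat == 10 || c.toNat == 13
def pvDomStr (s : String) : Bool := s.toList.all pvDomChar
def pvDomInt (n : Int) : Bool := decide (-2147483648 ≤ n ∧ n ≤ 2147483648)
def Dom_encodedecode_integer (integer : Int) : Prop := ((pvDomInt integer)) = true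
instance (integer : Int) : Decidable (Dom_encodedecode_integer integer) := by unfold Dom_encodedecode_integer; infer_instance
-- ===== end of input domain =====

-- B swaps the first and last characters of str(integer) by a list endpoint swap
-- instead of A's char-by-char accumulating loop with positional branches (objective: simpler).

-- ===== PORT A =====
-- the loop body: append last if nothing built yet, first if all but one built, else the current char
def encStep (length : Nat) (first last : Char) (string : List Char) (num : Char) : List Char :=
  if string.length = 0 then string ++ [last]
  else if string.length = length - 1 then string ++ [first]
  else string ++ [num]

def encodedecode_integer (integer : Int) : String :=
  let text := PySem.Int.toChars integer
  let length := text.length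
  match text with
  | [] => ""   -- unreachable: str(integer) is never empty (text[0] always succeeds in Python)
  | f :: _ =>
    let first := f
    let last := text.getLastD f   -- text[len(text)-1]; exact since text ≠ []
    String.mk (text.foldl (encStep length first last) [])

-- ===== PORT B =====
def encodedecode_integer_alt (integer : Int) : String :=
  let lst := PySem.Int.toChars integer
  match lst with
  | [] => ""   -- unreachable: str(integer) is never empty (lst[0] always exists in Python)
  | f :: _ =>
    -- lst[0], lst[-1] = lst[-1], lst[0]
    let swapped := (lst.set 0 (lst.getLastD f)).set (lst.length - 1) f
    String.mk swapped

-- ===== PRECONDITION & SPEC =====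
def Spec_encodedecode_integer (integer : Int) (out : String) : Prop := out = encodedecode_integer_alt integer
instance (integer : Int) (out : String) : Decidable (Spec_encodedecode_integer integer out) := by unfold Spec_encodedecode_integer; infer_instance

-- ===== CLAIM (what is proved, stated in full; the proofs are below) =====
def Claim_equal_encodedecode_integer : Prop := ∀ (integer : Int), Dom_encodedecode_integer integer → Spec_encodedecode_integer integer (encodedecode_integer integer)

-- ===== LEMMAS AND PROOFS =====

lemma getLastD_concat (f l : Char) (mid : List Char) : (f :: (mid ++ [l])).getLastD f = l := by
  induction mid generalizing f with
  | nil => rfl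
  | cons x xs ih => exact ih x

-- while 1 <= |acc| and |acc| + |mid| <= n - 1 the loop just copies characters
lemma encStep_mid (n : Nat) (first last : Char) (mid : List Char) :
    ∀ acc : List Char, 1 ≤ acc.length → acc.length + mid.length ≤ n - 1 →
      mid.foldl (encStep n first last) acc = acc ++ mid := by
  induction mid with
  | nil => intro acc _ _; simp
  | cons c cs ih =>
    intro acc h1 h2
    have hne0 : acc.length ≠ 0 := by omega
    have hne : acc.length ≠ n - 1 := by
      simp only [List.length_cons] at h2; omega
    simp only [List.foldl_cons, encStep, if_neg hne0, if_neg hne]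
    rw [ih (acc ++ [c]) (by simp) (by simp only [List.length_append, List.length_cons, List.length_nil] at h2 ⊢; omega)]
    simp

lemma foldl_enc_full (f l : Char) (mid : List Char) :
    (f :: (mid ++ [l])).foldl (encStep (mid.length + 2) f l) [] = l :: (mid ++ [f]) := by
  have h1 : encStep (mid.length + 2) f l [] f = [l] := by simp [encStep]
  rw [List.foldl_cons, h1, List.foldl_append]
  rw [encStep_mid (mid.length + 2) f l mid [l] (by simp) (by simp only [List.length_cons, List.length_nil]; omega)]
  have h2 : encStep (mid.length + 2) f l (l :: mid) l = l :: (mid ++ [f]) := by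
    simp [encStep]
  simpa using h2

lemma set_last (f l c : Char) (mid : List Char) :
    (f :: (mid ++ [l])).set (mid.length + 1) c = f :: (mid ++ [c]) := by
  rw [show f :: (mid ++ [l]) = (f :: mid) ++ [l] by simp,
      List.set_append_right _ _ (by simp)]
  simp

-- ===== VERDICT (by name: the statement is the Claim_ definition above) =====
theorem encodedecode_integer_spec : Claim_equal_encodedecode_integer := by
  intro integer _
  unfold Spec_encodedecode_integer encodedecode_integer encodedecode_integer_alt
  cases h : PySem.Int.toChars integer with
  | nil => rfl
  | cons f rest =>
    cases hr : rest.reverse with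
    | nil =>
      have : rest = [] := by simpa using congrArg List.reverse hr
      subst this
      simp [encStep]
    | cons l mid' =>
      have hrest : rest = mid'.reverse ++ [l] := by
        have := congrArg List.reverse hr; simpa using this
      subst hrest
      have hlen : (f :: (mid'.reverse ++ [l])).length = mid'.reverse.length + 2 := by simp
      simp only [hlen, getLastD_concat f l mid'.reverse]
      rw [foldl_enc_full f l mid'.reverse]
      rw [show ((f :: (mid'.reverse ++ [l])).set 0 l) = l :: (mid'.reverse ++ [l]) from rfl]
      rw [show mid'.reverse.length + 2 - 1 = mid'.reverse.length + 1 from rfl]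
      rw [set_last l l f mid'.reverse]
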